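-- pv_equiv track=rewrite | github.com/MrBrantCode/unitest_baseline | mut_generate/mist_train_cf/cf_93975/solution.py | find_longest_sublist
-- ===== SOURCE A (Python) =====
-- def find_longest_sublist(lst, target):
--     longest_sublist = []
--     longest_length = 0
--
--     for sublist in lst:
--         if sum(sublist) > target and len(sublist) > longest_length:
--             longest_sublist = sublist
--             longest_length = len(sublist)
--
--     return longest_sublist
-- ===== SOURCE B (Python) =====
-- def find_longest_sublist(lst, target):
--     # Stage 1: compute the optimal length (a pure numeric reduction).
--     best_len = max((len(s) for s in lst if sum(s) > target), default=0)
--     if best_len == 0: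
--         return []
--     # Stage 2: retrieve the earliest sublist achieving that length.
--     for s in lst:
--         if len(s) == best_len and sum(s) > target:
--             return s
-- ===== Notes on version B (the rewrite author's own statement) =====
-- stated objective: alternative
-- what changed: Replaces A's online best-sublist accumulator with a staged value-then-witness scheme: first a numeric reduction computes the optimal qualifying length, then a separate retrieval pass returns the earliest sublist of exactly that length.
import Mathlib
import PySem

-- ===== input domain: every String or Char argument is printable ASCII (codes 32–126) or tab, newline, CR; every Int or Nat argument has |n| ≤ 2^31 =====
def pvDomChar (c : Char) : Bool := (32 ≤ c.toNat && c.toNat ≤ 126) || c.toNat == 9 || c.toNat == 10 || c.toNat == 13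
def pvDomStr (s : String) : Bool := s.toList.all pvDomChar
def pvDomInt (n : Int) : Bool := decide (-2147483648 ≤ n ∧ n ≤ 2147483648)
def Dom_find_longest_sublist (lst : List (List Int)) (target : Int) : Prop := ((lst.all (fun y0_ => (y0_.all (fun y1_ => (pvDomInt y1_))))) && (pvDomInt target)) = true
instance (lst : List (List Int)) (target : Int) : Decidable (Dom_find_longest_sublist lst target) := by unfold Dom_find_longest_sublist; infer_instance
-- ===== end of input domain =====

-- B replaces A's online best-sublist accumulator with a staged scheme: first compute the optimal
-- qualifying length (a numeric reduction), then retrieve the earliest sublist of that length.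

-- ===== PORT A =====
-- literal port of A: one loop, accumulator = (longest_sublist, longest_length)
def find_longest_sublist (lst : List (List Int)) (target : Int) : List Int :=
  (lst.foldl
    (fun acc sublist =>
      if sublist.sum > target ∧ (sublist.length : Int) > acc.2
      then (sublist, (sublist.length : Int))
      else acc)
    (([] : List Int), (0 : Int))).1

-- ===== PORT B =====
-- literal port of B: best_len = max(generator of qualifying lengths, default=0);
-- if best_len == 0 return []; else return the first sublist with len == best_len and sum > target
-- (B's final for-loop always finds one when best_len > 0, so getD [] is never the fallthrough).
def find_longest_sublist_alt (lst : List (List Int)) (target : Int) : List Int :=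
  let lens : List Int := (lst.filter (fun s => decide (s.sum > target))).map (fun s => (s.length : Int))
  let best_len : Int := match lens with | [] => 0 | h :: t => t.foldl max h
  if best_len = 0 then []
  else (lst.find? (fun s => decide ((s.length : Int) = best_len) && decide (s.sum > target))).getD []

-- ===== PRECONDITION & SPEC =====
def Spec_find_longest_sublist (lst : List (List Int)) (target : Int) (out : List Int) : Prop := out = find_longest_sublist_alt lst target
instance (lst : List (List Int)) (target : Int) (out : List Int) : Decidable (Spec_find_longest_sublist lst target out) := by unfold Spec_find_longest_sublist; infer_instance

-- ===== CLAIM (what is proved, stated in full; the proofs are below) =====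
def Claim_equal_find_longest_sublist : Prop := ∀ (lst : List (List Int)) (target : Int), Dom_find_longest_sublist lst target → Spec_find_longest_sublist lst target (find_longest_sublist lst target)

-- ===== LEMMAS AND PROOFS =====

-- the length component of A's accumulator, as its own fold
def maxLen (target : Int) (lst : List (List Int)) (n : Int) : Int :=
  lst.foldl (fun m s => if s.sum > target ∧ (s.length : Int) > m then (s.length : Int) else m) n

def pfind (target M : Int) (lst : List (List Int)) : Option (List Int) :=
  lst.find? (fun s => decide (s.sum > target) && decide ((s.length : Int) = M))

theorem maxLen_cons (target : Int) (s : List Int) (t : List (List Int)) (n : Int) :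
    maxLen target (s :: t) n
      = maxLen target t (if s.sum > target ∧ (s.length : Int) > n then (s.length : Int) else n) := rfl

theorem pfind_cons_pos (target M : Int) (s : List Int) (t : List (List Int))
    (h : (decide (s.sum > target) && decide ((s.length : Int) = M)) = true) :
    pfind target M (s :: t) = some s := by
  simp [pfind, h]

theorem pfind_cons_neg (target M : Int) (s : List Int) (t : List (List Int))
    (h : ¬ (decide (s.sum > target) && decide ((s.length : Int) = M)) = true) :
    pfind target M (s :: t) = pfind target M t := by
  simp [pfind, eq_false_of_ne_true h]

theorem maxLen_ge (target : Int) : ∀ (lst : List (List Int)) (n : Int), n ≤ maxLen target lst n := by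
  intro lst
  induction lst with
  | nil => intro n; simp [maxLen]
  | cons s t ih =>
    intro n
    rw [maxLen_cons]
    split_ifs with h
    · exact le_trans (le_of_lt h.2) (ih _)
    · exact ih n

theorem pfind_some (target : Int) : ∀ (lst : List (List Int)) (n : Int),
    maxLen target lst n ≠ n → (pfind target (maxLen target lst n) lst).isSome := by
  intro lst
  induction lst with
  | nil => intro n h; exact absurd rfl h
  | cons s t ih =>
    intro n h
    rw [maxLen_cons] at h ⊢
    by_cases hp : (decide (s.sum > target) &&
        decide ((s.length : Int) = maxLen target t
          (if s.sum > target ∧ (s.length : Int) > n then (s.length : Int) else n))) = true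
    · rw [pfind_cons_pos _ _ _ _ hp]; rfl
    · rw [pfind_cons_neg _ _ _ _ hp]
      by_cases hc : s.sum > target ∧ (s.length : Int) > n
      · rw [if_pos hc] at h hp ⊢
        apply ih
        intro he
        apply hp
        simp [he, hc.1]
      · rw [if_neg hc] at h hp ⊢
        exact ih n h

-- characterisation of A's loop: it returns the start value v unless the maximal qualifying
-- length strictly grows, in which case it returns the first sublist attaining that maximum
theorem A_char (target : Int) : ∀ (lst : List (List Int)) (v : List Int),
    (lst.foldl
      (fun acc sublist =>
        if sublist.sum > target ∧ (sublist.length : Int) > acc.2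
        then (sublist, (sublist.length : Int))
        else acc)
      (v, (v.length : Int))).1
    = if maxLen target lst (v.length : Int) = (v.length : Int) then v
      else (pfind target (maxLen target lst (v.length : Int)) lst).getD v := by
  intro lst
  induction lst with
  | nil => intro v; simp [maxLen]
  | cons s t ih =>
    intro v
    rw [maxLen_cons]
    simp only [List.foldl_cons]
    by_cases hc : s.sum > target ∧ (s.length : Int) > (v.length : Int)
    · -- accumulator updates to (s, s.length)
      rw [if_pos hc,
        if_pos (show s.sum > target ∧ (s.length : Int) > ((v, (v.length : Int)).2) from hc)]
      have hMge : (s.length : Int) ≤ maxLen target t (s.length : Int) := maxLen_ge target t _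
      have hMne : maxLen target t (s.length : Int) ≠ (v.length : Int) := by omega
      rw [if_neg hMne]
      rw [ih s]
      by_cases he : maxLen target t (s.length : Int) = (s.length : Int)
      · rw [if_pos he]
        rw [pfind_cons_pos _ _ _ _ (by simp [hc.1, he])]
        rfl
      · rw [if_neg he]
        rw [pfind_cons_neg _ _ _ _ (by simp [hc.1]; omega)]
        rcases Option.isSome_iff_exists.mp (pfind_some target t (s.length : Int) he) with ⟨x, hx⟩
        rw [hx]; rfl
    · -- accumulator unchanged at (v, v.length); the new M cannot be s.length
      rw [if_neg hc,
        if_neg (show ¬ (s.sum > target ∧ (s.length : Int) > ((v, (v.length : Int)).2)) from hc)]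
      rw [ih v]
      by_cases he : maxLen target t (v.length : Int) = (v.length : Int)
      · rw [if_pos he, if_pos he]
      · rw [if_neg he, if_neg he]
        have hge : (v.length : Int) ≤ maxLen target t (v.length : Int) := maxLen_ge target t _
        rw [pfind_cons_neg _ _ _ _ (by
          intro hp
          rcases Bool.and_eq_true_iff.mp hp with ⟨h1, h2⟩
          have h1' : s.sum > target := of_decide_eq_true h1
          have h2' : (s.length : Int) = maxLen target t (v.length : Int) := of_decide_eq_true h2
          exact hc ⟨h1', by omega⟩)]

-- maxLen is the max-fold over the qualifying lengths
theorem maxLen_eq_fold (target : Int) : ∀ (lst : List (List Int)) (n : Int),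
    maxLen target lst n
      = List.foldl max n ((lst.filter (fun s => decide (s.sum > target))).map (fun s => (s.length : Int))) := by
  intro lst
  induction lst with
  | nil => intro n; simp [maxLen]
  | cons s t ih =>
    intro n
    rw [maxLen_cons]
    by_cases hq : s.sum > target
    · rw [List.filter_cons_of_pos (by simpa using hq), List.map_cons, List.foldl_cons]
      rw [show (if s.sum > target ∧ (s.length : Int) > n then (s.length : Int) else n)
            = max n (s.length : Int) by
        by_cases hl : (s.length : Int) > n
        · rw [if_pos ⟨hq, hl⟩]; omega
        · rw [if_neg (fun h => hl h.2)]; omega]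
      exact ih _
    · rw [List.filter_cons_of_neg (by simpa using hq)]
      rw [if_neg (fun h => hq h.1)]
      exact ih n

-- foldl max with a 0 seed over a nonneg head absorbs the seed
theorem foldl_max_zero (h : Int) (t : List Int) (hh : 0 ≤ h) :
    List.foldl max 0 (h :: t) = List.foldl max h t := by
  simp [List.foldl_cons, max_eq_right hh]

-- ===== VERDICT (by name: the statement is the Claim_ definition above) =====
theorem find_longest_sublist_spec : Claim_equal_find_longest_sublist := by
  intro lst target _
  unfold Spec_find_longest_sublist find_longest_sublist find_longest_sublist_alt
  have hchar := A_char target lst []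
  simp only [List.length_nil, Nat.cast_zero] at hchar
  rw [hchar]
  -- B's best_len equals maxLen target lst 0
  have hbest : (match (lst.filter (fun s => decide (s.sum > target))).map (fun s => (s.length : Int)) with
      | [] => (0 : Int) | h :: t => t.foldl max h) = maxLen target lst 0 := by
    rw [maxLen_eq_fold]
    cases hls : (lst.filter (fun s => decide (s.sum > target))).map (fun s => (s.length : Int)) with
    | nil => simp
    | cons h t =>
      have hh : 0 ≤ h := by
        have : h ∈ (lst.filter (fun s => decide (s.sum > target))).map (fun s => (s.length : Int)) := by
          rw [hls]; exact List.mem_cons_self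
        rcases List.mem_map.mp this with ⟨s, _, hs⟩
        omega
      simpa using (foldl_max_zero h t hh).symm
  simp only [hbest]
  by_cases he : maxLen target lst 0 = 0
  · rw [if_pos he, if_pos he]
  · rw [if_neg he, if_neg he]
    have hpred : (fun s : List Int => decide ((s.length : Int) = maxLen target lst 0) && decide (s.sum > target))
        = (fun s : List Int => decide (s.sum > target) && decide ((s.length : Int) = maxLen target lst 0)) := by
      funext s; exact Bool.and_comm _ _
    rw [hpred]
    rfl
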